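-- pv_equiv track=rewrite | github.com/efim1222/prepareEGE | 23-zadanie EGE/ВЕБИНАР/1.py | f
-- ===== SOURCE A (Python) =====
-- def f(a, b, c):
--     c += 1
--     if a == b:
--         return 1
--     if a > b:
--         return 0
--     if a < b:
--         if c % 3 == 0:
--             return f(a + 5, b, c) + f(a * 2, b, c)
--         else:
--             return f(a + 5, b, c) + f(a * 2, b, c) + f(a + 10, b, c)
-- ===== SOURCE B (Python) =====
-- def _val(V, b, x, r):
--     if x == b:
--         return 1
--     if x > b:
--         return 0
--     return V[(x, r)]
--
--
-- def f(a, b, c):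
--     if a == b:
--         return 1
--     if a > b:
--         return 0
--     # bottom-up dynamic programme over states (x, c%3), x from b-1 down to a
--     V = {}
--     for x in range(b - 1, a - 1, -1):
--         for r in (0, 1, 2):
--             r2 = (r + 1) % 3
--             t = _val(V, b, x + 5, r2) + _val(V, b, x * 2, r2)
--             if r2 != 0:
--                 t = t + _val(V, b, x + 10, r2)
--             V[(x, r)] = t
--     return V[(a, c % 3)]
-- ===== Notes on version B (the rewrite author's own statement) =====
-- stated objective: alternative
-- what changed: A's three-way branching recursion is replaced by an iterative bottom-up dynamic programme over the states (x, c % 3) for x from b-1 down to a, computing each state once instead of re-deriving it through overlapping recursive calls.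
import Mathlib
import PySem

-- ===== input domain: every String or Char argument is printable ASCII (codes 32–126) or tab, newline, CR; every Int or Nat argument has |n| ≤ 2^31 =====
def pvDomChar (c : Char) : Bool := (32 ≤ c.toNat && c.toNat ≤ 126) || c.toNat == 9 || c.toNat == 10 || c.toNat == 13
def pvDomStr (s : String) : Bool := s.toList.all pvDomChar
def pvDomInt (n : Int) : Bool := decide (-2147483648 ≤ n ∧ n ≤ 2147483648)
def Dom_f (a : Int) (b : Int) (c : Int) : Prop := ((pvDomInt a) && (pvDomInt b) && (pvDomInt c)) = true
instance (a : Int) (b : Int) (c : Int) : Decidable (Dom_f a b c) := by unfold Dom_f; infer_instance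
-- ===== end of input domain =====

-- B replaces A's three-way branching recursion by an iterative bottom-up dynamic programme
-- over the states (x, c % 3) for x from b-1 down to a, computing each state once
-- (objective: alternative).

-- ===== PORT A =====
-- A is recursive; on the inputs Pre_f admits every call strictly increases a while a < b
-- (a ≥ 1 there), so the recursion depth is at most (b-a).toNat and fuel (b-a).toNat + 1
-- makes fGo compute exactly A's recursion wherever A returns.
def fGo : Nat → Int → Int → Int → Int
  | 0, _, _, _ => 0
  | fuel + 1, a, b, c =>
    let c := c + 1
    if a = b then 1
    else if a > b then 0
    else if PySem.Int.mod c 3 = 0 then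
      fGo fuel (a + 5) b c + fGo fuel (a * 2) b c
    else
      fGo fuel (a + 5) b c + fGo fuel (a * 2) b c + fGo fuel (a + 10) b c

def f (a : Int) (b : Int) (c : Int) : Int := fGo ((b - a).toNat + 1) a b c

-- ===== PORT B =====
-- _val(V, b, x, r): Python raises KeyError when (x, r) is absent; that happens only outside
-- Pre_f (a < b with a ≤ 0), so getD 0 is exact on the admitted inputs (key presence is proved).
def pvVal (V : PySem.Dict (Int × Int) Int) (b x r : Int) : Int :=
  if x = b then 1
  else if x > b then 0
  else V.getD (x, r) 0

-- the body of the inner 'for r in (0, 1, 2)' loop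
def pvStepR (b x : Int) (V : PySem.Dict (Int × Int) Int) (r : Int) : PySem.Dict (Int × Int) Int :=
  let r2 := PySem.Int.mod (r + 1) 3
  let t := pvVal V b (x + 5) r2 + pvVal V b (x * 2) r2
  let t := if r2 ≠ 0 then t + pvVal V b (x + 10) r2 else t
  V.insert (x, r) t

def f_alt (a : Int) (b : Int) (c : Int) : Int :=
  if a = b then 1
  else if a > b then 0
  else
    let V := (PySem.List.pyRange (b - 1) (a - 1) (-1)).foldl
      (fun V x => [(0 : Int), 1, 2].foldl (pvStepR b x) V) PySem.Dict.empty
    V.getD (a, PySem.Int.mod c 3) 0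

-- ===== PRECONDITION & SPEC =====
-- Pre_f excludes exactly the inputs where A never returns normally: for a < b with a ≤ 0 the
-- recursive call f(a*2, b, c) does not increase a, so A recurses without bound
-- (RecursionError); B raises KeyError there.
def Pre_f (a : Int) (b : Int) (c : Int) : Prop := 1 ≤ a ∨ b ≤ a
instance (a : Int) (b : Int) (c : Int) : Decidable (Pre_f a b c) := by unfold Pre_f; infer_instance
def pvWitness_f : Int × Int × Int := (1, 12, 0)

def Spec_f (a : Int) (b : Int) (c : Int) (out : Int) : Prop := out = f_alt a b c
instance (a : Int) (b : Int) (c : Int) (out : Int) : Decidable (Spec_f a b c out) := by unfold Spec_f; infer_instance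

-- ===== CLAIM (what is proved, stated in full; the proofs are below) =====
def Claim_equal_f : Prop := ∀ (a : Int) (b : Int) (c : Int), Dom_f a b c → Pre_f a b c → Spec_f a b c (f a b c)

-- ===== LEMMAS AND PROOFS =====

-- one unfolding step of A's recursion
lemma fGo_succ (n : Nat) (a b c : Int) :
    fGo (n + 1) a b c =
      if a = b then 1
      else if a > b then 0
      else if PySem.Int.mod (c + 1) 3 = 0 then
        fGo n (a + 5) b (c + 1) + fGo n (a * 2) b (c + 1)
      else
        fGo n (a + 5) b (c + 1) + fGo n (a * 2) b (c + 1) + fGo n (a + 10) b (c + 1) := rfl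

-- fGo depends on c only through c % 3
lemma fGo_mod (n : Nat) : ∀ (a b c c' : Int),
    PySem.Int.mod c 3 = PySem.Int.mod c' 3 → fGo n a b c = fGo n a b c' := by
  induction n with
  | zero => intro a b c c' _; rfl
  | succ n ih =>
    intro a b c c' h
    have h3 : (0:Int) < 3 := by norm_num
    rw [PySem.Int.mod_eq_emod_of_pos h3, PySem.Int.mod_eq_emod_of_pos h3] at h
    have hm : PySem.Int.mod (c + 1) 3 = PySem.Int.mod (c' + 1) 3 := by
      rw [PySem.Int.mod_eq_emod_of_pos h3, PySem.Int.mod_eq_emod_of_pos h3]; omega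
    simp only [fGo, hm, ih (a + 5) b (c + 1) (c' + 1) hm, ih (a * 2) b (c + 1) (c' + 1) hm,
      ih (a + 10) b (c + 1) (c' + 1) hm]

-- fuel irrelevance once fuel exceeds the depth bound, for a ≥ 1
lemma fGo_fuel (n : Nat) : ∀ (m : Nat) (a b c : Int), 1 ≤ a →
    (b - a).toNat < n → (b - a).toNat < m → fGo n a b c = fGo m a b c := by
  induction n with
  | zero => intro m a b c _ h _; omega
  | succ n ih =>
    intro m a b c ha hn hm
    cases m with
    | zero => omega
    | succ m =>
      simp only [fGo]
      by_cases hab : a = b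
      · simp [hab]
      · simp only [hab, if_false]
        by_cases hgt : a > b
        · simp [hgt]
        · simp only [hgt, if_false]
          have hlt : a < b := by omega
          rw [ih m (a + 5) b (c + 1) (by omega) (by omega) (by omega),
              ih m (a * 2) b (c + 1) (by omega) (by omega) (by omega),
              ih m (a + 10) b (c + 1) (by omega) (by omega) (by omega)]

-- the value A's recursion computes at state (x, r), b fixed, with canonical sufficient fuel
def G (b x r : Int) : Int := fGo ((b - x).toNat + 1) x b r

-- the pure child value (what _val computes when the table is correct)
def Gc (b y r : Int) : Int := if y = b then 1 else if y > b then 0 else G b y r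

lemma fGo_child (b x y r : Int) (hxb : x < b) (hxy : x < y) (hy1 : 1 ≤ y) :
    fGo ((b - x).toNat) y b (r + 1) = Gc b y (PySem.Int.mod (r + 1) 3) := by
  have h3 : (0:Int) < 3 := by norm_num
  obtain ⟨k, hk'⟩ : ∃ k, (b - x).toNat = k + 1 := ⟨(b - x).toNat - 1, by omega⟩
  unfold Gc
  by_cases hyb : y = b
  · rw [hyb, hk', fGo_succ]; simp
  · simp only [hyb, if_false]
    by_cases hgt : y > b
    · rw [hk', fGo_succ]; simp [hyb, hgt]
    · simp only [hgt, if_false]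
      unfold G
      rw [fGo_fuel ((b - x).toNat) ((b - y).toNat + 1) y b (r + 1) hy1 (by omega) (by omega)]
      exact fGo_mod _ y b (r + 1) (PySem.Int.mod (r + 1) 3) (by
        simp only [PySem.Int.mod_eq_emod_of_pos h3]; omega)

-- one unfolding of A's recursion, phrased on the residue r = c % 3
lemma G_eq (b x r : Int) (hx : 1 ≤ x) (hxb : x < b) :
    G b x r =
      if PySem.Int.mod (r + 1) 3 = 0 then
        Gc b (x + 5) (PySem.Int.mod (r + 1) 3) + Gc b (x * 2) (PySem.Int.mod (r + 1) 3)
      else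
        Gc b (x + 5) (PySem.Int.mod (r + 1) 3) + Gc b (x * 2) (PySem.Int.mod (r + 1) 3)
          + Gc b (x + 10) (PySem.Int.mod (r + 1) 3) := by
  have hne : x ≠ b := by omega
  have hngt : ¬ x > b := by omega
  have c1 := fGo_child b x (x + 5) r hxb (by omega) (by omega)
  have c2 := fGo_child b x (x * 2) r hxb (by omega) (by omega)
  have c3 := fGo_child b x (x + 10) r hxb (by omega) (by omega)
  obtain ⟨k, hk'⟩ : ∃ k, (b - x).toNat = k + 1 := ⟨(b - x).toNat - 1, by omega⟩
  unfold G
  rw [hk', fGo_succ, if_neg hne, if_neg hngt]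
  rw [hk'] at c1 c2 c3
  rw [c1, c2, c3]

-- table invariant: all states (x, r) with t ≤ x < b are stored and correct
def InvV (b t : Int) (V : PySem.Dict (Int × Int) Int) : Prop :=
  ∀ x r : Int, t ≤ x → x < b → (r = 0 ∨ r = 1 ∨ r = 2) → V.getD (x, r) 0 = G b x r

lemma pvVal_eq (V : PySem.Dict (Int × Int) Int) (b x y r : Int)
    (hInv : InvV b (x + 1) V) (hxy : x < y) (hr : r = 0 ∨ r = 1 ∨ r = 2) :
    pvVal V b y r = Gc b y r := by
  unfold pvVal Gc
  by_cases hyb : y = b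
  · simp [hyb]
  · simp only [hyb, if_false]
    by_cases hgt : y > b
    · simp [hgt]
    · simp only [hgt, if_false]
      exact hInv y r (by omega) (by omega) hr

lemma pvStepR_val (V : PySem.Dict (Int × Int) Int) (b x r : Int)
    (hx : 1 ≤ x) (hxb : x < b) (hInv : InvV b (x + 1) V) :
    pvStepR b x V r = V.insert (x, r) (G b x r) := by
  simp only [pvStepR]
  have h3 : (0:Int) < 3 := by norm_num
  have hr2 : PySem.Int.mod (r + 1) 3 = 0 ∨ PySem.Int.mod (r + 1) 3 = 1 ∨ PySem.Int.mod (r + 1) 3 = 2 := by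
    have := PySem.Int.mod_nonneg (r + 1) h3
    have := PySem.Int.mod_lt (r + 1) h3
    omega
  rw [pvVal_eq V b x (x + 5) _ hInv (by omega) hr2,
      pvVal_eq V b x (x * 2) _ hInv (by omega) hr2,
      pvVal_eq V b x (x + 10) _ hInv (by omega) hr2]
  rw [G_eq b x r hx hxb]
  simp

lemma getD_insert' (V : PySem.Dict (Int × Int) Int) (k k' : Int × Int) (v : Int) :
    (V.insert k v).getD k' 0 = if k' = k then v else V.getD k' 0 := by
  simp [PySem.Dict.getD_insert]

lemma step_inv (V : PySem.Dict (Int × Int) Int) (b x : Int)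
    (hx : 1 ≤ x) (hxb : x < b) (hInv : InvV b (x + 1) V) :
    InvV b x ([(0 : Int), 1, 2].foldl (pvStepR b x) V) := by
  have hInv1 : InvV b (x + 1) (V.insert (x, 0) (G b x 0)) := by
    intro x' r' hle hlt hr
    rw [getD_insert', if_neg (by intro h; injection h with h1 h2; omega)]
    exact hInv x' r' hle hlt hr
  have hInv2 : InvV b (x + 1) ((V.insert (x, 0) (G b x 0)).insert (x, 1) (G b x 1)) := by
    intro x' r' hle hlt hr
    rw [getD_insert', if_neg (by intro h; injection h with h1 h2; omega)]
    exact hInv1 x' r' hle hlt hr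
  simp only [List.foldl]
  rw [pvStepR_val V b x 0 hx hxb hInv,
      pvStepR_val _ b x 1 hx hxb hInv1,
      pvStepR_val _ b x 2 hx hxb hInv2]
  intro x' r' hle hlt hr
  by_cases hxx : x' = x
  · subst hxx
    rcases hr with h | h | h <;> subst h <;>
      simp only [getD_insert'] <;> norm_num
  · rw [getD_insert', if_neg (by intro h; injection h with h1 _; exact hxx h1),
        getD_insert', if_neg (by intro h; injection h with h1 _; exact hxx h1),
        getD_insert', if_neg (by intro h; injection h with h1 _; exact hxx h1)]
    exact hInv x' r' (by omega) hlt hr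

lemma loop_inv (n : Nat) : ∀ (hi a b : Int) (V : PySem.Dict (Int × Int) Int), 1 ≤ a →
    a - 1 ≤ hi → (hi - (a - 1)).toNat = n → hi < b → InvV b (hi + 1) V →
    InvV b a ((PySem.List.pyRange hi (a - 1) (-1)).foldl
      (fun V x => [(0 : Int), 1, 2].foldl (pvStepR b x) V) V) := by
  induction n with
  | zero =>
    intro hi a b V ha h1 h2 hb hInv
    have : hi = a - 1 := by omega
    subst this
    rw [PySem.List.pyRange_neg_one_eq_nil (by omega)]
    simpa using hInv
  | succ n ih =>
    intro hi a b V ha h1 h2 hb hInv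
    have hlt : a - 1 < hi := by omega
    rw [PySem.List.pyRange_neg_one_cons hlt]
    simp only [List.foldl_cons]
    exact ih (hi - 1) a b _ ha (by omega) (by omega) (by omega)
      (by
        have := step_inv V b hi (by omega) hb hInv
        simpa using this)

-- ===== VERDICT (by name: the statement is the Claim_ definition above) =====
theorem f_spec : Claim_equal_f := by
  unfold Claim_equal_f
  intro a b c _ hpre
  unfold Spec_f f f_alt
  have h3 : (0:Int) < 3 := by norm_num
  by_cases hab : a = b
  · subst hab
    have : (a - a).toNat = 0 := by omega
    rw [this, fGo_succ]
    simp
  · by_cases hgt : a > b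
    · have : (b - a).toNat = 0 := by omega
      rw [this, fGo_succ]
      simp [hab, hgt]
    · have hlt : a < b := by omega
      have ha : 1 ≤ a := by rcases hpre with h | h <;> omega
      simp only [if_neg hab, if_neg hgt]
      have hempty : InvV b (b - 1 + 1) PySem.Dict.empty := by
        intro x r h1 h2 _; omega
      have hinv := loop_inv ((b - 1 - (a - 1)).toNat) (b - 1) a b PySem.Dict.empty ha
        (by omega) rfl (by omega) hempty
      have hr : PySem.Int.mod c 3 = 0 ∨ PySem.Int.mod c 3 = 1 ∨ PySem.Int.mod c 3 = 2 := by
        have := PySem.Int.mod_nonneg c h3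
        have := PySem.Int.mod_lt c h3
        omega
      rw [hinv a (PySem.Int.mod c 3) le_rfl hlt hr]
      unfold G
      exact fGo_mod _ a b c (PySem.Int.mod c 3) (by
        simp only [PySem.Int.mod_eq_emod_of_pos h3]; omega)
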